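-- pv_equiv track=rewrite | github.com/mws19901118/Leetcode | Code/Maximum Coins Heroes Can Collect.py | maximumCoins
-- ===== SOURCE A (Python) =====
-- from typing import List
--
-- def maximumCoins(heroes: List[int], monsters: List[int], coins: List[int]) -> List[int]:
--     sortedMonster = sorted([(x, y) for x, y in zip(monsters, coins)])            #Sort monster and coin by the power of monster.
--     sortedHero = sorted((x, i) for i, x in enumerate(heroes))                    #Sort hero by the power of hero and keeps original index.
--     result = [0] * len(heroes)                                                   #Initialize result.
--     index, prev = 0, 0                                                           #Use a pointer to traverse sortedMonster also keeps the result of previous hero(initially 0).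
--     for x, i in sortedHero:                                                      #Traverse sortedHero.
--         result[i] = prev                                                         #Result of current hero should be not smaller than previous hero.
--         while index < len(sortedMonster) and sortedMonster[index][0] <= x:       #Move forward index while it is valid and its monster has power smaller than or equal to current hero.
--             result[i] += sortedMonster[index][1]                                 #Add its coin to current hero.
--             index += 1
--         prev = result[i]                                                         #Update prev.
--     return result
-- ===== SOURCE B (Python) =====
-- from typing import List
--
-- def maximumCoins(heroes: List[int], monsters: List[int], coins: List[int]) -> List[int]:
--     return [sum(c for m, c in zip(monsters, coins) if m <= h) for h in heroes]
-- ===== Notes on version B (the rewrite author's own statement) =====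
-- stated objective: simpler
-- what changed: Replaces the double sort plus two-pointer sweep with a one-line per-hero comprehension that sums the coins of all monsters no stronger than that hero, directly over the unsorted zipped lists.
import Mathlib
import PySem

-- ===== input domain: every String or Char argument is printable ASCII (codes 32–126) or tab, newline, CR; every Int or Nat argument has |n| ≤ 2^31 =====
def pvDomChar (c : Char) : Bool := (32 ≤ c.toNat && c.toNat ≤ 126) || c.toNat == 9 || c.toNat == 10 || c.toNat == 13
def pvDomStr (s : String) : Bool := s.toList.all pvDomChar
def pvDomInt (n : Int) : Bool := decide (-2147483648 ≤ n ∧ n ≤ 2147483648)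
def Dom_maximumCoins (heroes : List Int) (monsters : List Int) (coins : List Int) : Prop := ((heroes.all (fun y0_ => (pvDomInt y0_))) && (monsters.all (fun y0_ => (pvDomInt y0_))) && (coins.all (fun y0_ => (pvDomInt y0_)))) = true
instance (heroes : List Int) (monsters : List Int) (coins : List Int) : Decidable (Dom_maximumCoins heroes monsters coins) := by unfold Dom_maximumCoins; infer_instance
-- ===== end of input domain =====

-- B replaces A's double sort + two-pointer sweep by a direct per-hero sum over the zipped monster/coin lists (simpler, not faster).


-- ===== PORT A =====
-- inner 'while index < len(sortedMonster) and sortedMonster[index][0] <= x: result[i] += sortedMonster[index][1]; index += 1'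
def maximumCoinsWhile (sm : List (Int × Int)) (x : Int) (i : Int) (result : List Int) (index : Nat) :
    List Int × Nat :=
  if h : index < sm.length then
    if (sm[index]'h).1 ≤ x then
      maximumCoinsWhile sm x i
        (PySem.List.pySetD result i (PySem.List.pyGetD result i 0 + (sm[index]'h).2))
        (index + 1)
    else (result, index)
  else
    (result, index)
termination_by sm.length - index
decreasing_by omega

def maximumCoins (heroes : List Int) (monsters : List Int) (coins : List Int) : List Int :=
  let sortedMonster := PySem.List.sorted2 (monsters.zip coins) (fun p => p.1) (fun p => p.2)
  let sortedHero := PySem.List.sorted2 ((PySem.List.enumerate heroes).map (fun p => (p.2, p.1)))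
      (fun p => p.1) (fun p => p.2)
  let result : List Int := List.replicate heroes.length 0
  let fin := sortedHero.foldl
    (fun (st : List Int × Nat × Int) q =>
      let result1 := PySem.List.pySetD st.1 q.2 st.2.2
      let w := maximumCoinsWhile sortedMonster q.1 q.2 result1 st.2.1
      (w.1, w.2, PySem.List.pyGetD w.1 q.2 0))
    (result, 0, 0)
  fin.1

-- ===== PORT B =====
def maximumCoins_alt (heroes : List Int) (monsters : List Int) (coins : List Int) : List Int :=
  heroes.map (fun h =>
    (((monsters.zip coins).filter (fun p => decide (p.1 ≤ h))).map (fun p => p.2)).sum)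

-- ===== PRECONDITION & SPEC =====
def Spec_maximumCoins (heroes : List Int) (monsters : List Int) (coins : List Int) (out : List Int) : Prop := out = maximumCoins_alt heroes monsters coins
instance (heroes : List Int) (monsters : List Int) (coins : List Int) (out : List Int) : Decidable (Spec_maximumCoins heroes monsters coins out) := by unfold Spec_maximumCoins; infer_instance

-- ===== CLAIM (what is proved, stated in full; the proofs are below) =====
def Claim_equal_maximumCoins : Prop := ∀ (heroes : List Int) (monsters : List Int) (coins : List Int), Dom_maximumCoins heroes monsters coins → Spec_maximumCoins heroes monsters coins (maximumCoins heroes monsters coins)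

-- ===== LEMMAS AND PROOFS =====

-- insertBy preserves Pairwise for a transitive relation the comparator respects in both directions
theorem pv_insertBy_pairwise {α : Type} (before : α → α → Bool) (R : α → α → Prop)
    (hT : ∀ a b c, R a b → R b c → R a c)
    (hTrue : ∀ a b, before a b = true → R a b)
    (hFalse : ∀ a b, before a b = false → R b a)
    (x : α) (ys : List α) (hys : ys.Pairwise R) :
    (PySem.List.insertBy before x ys).Pairwise R := by
  induction ys with
  | nil => simp [PySem.List.insertBy]
  | cons y ys ih =>
    rcases List.pairwise_cons.mp hys with ⟨hy, hys'⟩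
    by_cases hb : before x y = true
    · simp only [PySem.List.insertBy, hb, if_pos]
      refine List.pairwise_cons.mpr ⟨?_, hys⟩
      intro z hz
      rcases List.mem_cons.mp hz with rfl | hz'
      · exact hTrue _ _ hb
      · exact hT _ _ _ (hTrue _ _ hb) (hy _ hz')
    · simp only [PySem.List.insertBy, hb, if_neg, Bool.not_eq_true]
      refine List.pairwise_cons.mpr ⟨?_, ih hys'⟩
      intro z hz
      rcases (PySem.List.mem_insertBy _ _ _ _).mp hz with rfl | hz'
      · exact hFalse _ _ (by simpa using hb)
      · exact hy _ hz'

-- sorted2 is ordered by its first key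
theorem pv_sorted2_pairwise_fst {α : Type} (xs : List α) (k1 k2 : α → Int) :
    (PySem.List.sorted2 xs k1 k2).Pairwise (fun a b => k1 a ≤ k1 b) := by
  unfold PySem.List.sorted2
  simp only
  suffices h : ∀ (acc : List α), acc.Pairwise (fun a b => k1 a ≤ k1 b) →
      (xs.foldl (fun acc x => PySem.List.insertBy
        (fun a b => decide (k1 a < k1 b) || (!decide (k1 b < k1 a) && decide (k2 a < k2 b))) x acc) acc).Pairwise
        (fun a b => k1 a ≤ k1 b) by
    exact h [] (by simp)
  induction xs with
  | nil => intro acc hacc; simpa using hacc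
  | cons x xs ih =>
    intro acc hacc
    simp only [List.foldl_cons]
    apply ih
    apply pv_insertBy_pairwise _ (fun a b => k1 a ≤ k1 b) (fun a b c => le_trans)
    · intro a b hb
      rcases Bool.or_eq_true_iff.mp hb with h | h
      · exact le_of_lt (of_decide_eq_true h)
      · rcases Bool.and_eq_true_iff.mp h with ⟨h1, _⟩
        simp only [Bool.not_eq_eq_eq_not, Bool.not_true, decide_eq_false_iff_not, not_lt] at h1
        exact h1
    · intro a b hb
      simp only [Bool.or_eq_false_iff, decide_eq_false_iff_not, not_lt, Bool.and_eq_false_iff] at hb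
      exact hb.1
    · exact hacc

-- count of monsters no stronger than x, in the sorted monster list
def pvCnt (sm : List (Int × Int)) (x : Int) : Nat := sm.countP (fun p => decide (p.1 ≤ x))

theorem pv_cnt_le_length (sm : List (Int × Int)) (x : Int) : pvCnt sm x ≤ sm.length :=
  List.countP_le_length

theorem pv_cnt_mono (sm : List (Int × Int)) {x y : Int} (hxy : x ≤ y) :
    pvCnt sm x ≤ pvCnt sm y := by
  apply List.countP_mono_left
  intro p _ hp
  simp only [decide_eq_true_eq] at hp ⊢
  exact le_trans hp hxy

-- in a fst-sorted list, the first pvCnt elements are exactly those with fst ≤ x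
theorem pv_take_cnt (sm : List (Int × Int)) (hs : sm.Pairwise (fun a b => a.1 ≤ b.1)) (x : Int) :
    sm.take (pvCnt sm x) = sm.filter (fun p => decide (p.1 ≤ x)) := by
  induction sm with
  | nil => simp [pvCnt]
  | cons a t ih =>
    rcases List.pairwise_cons.mp hs with ⟨ha, ht⟩
    by_cases hax : a.1 ≤ x
    · simp only [pvCnt, List.countP_cons, List.filter_cons, hax, decide_true, if_pos,
        List.take_succ_cons]
      rw [← pvCnt] at *
      simpa [pvCnt] using ih ht
    · have h0 : t.countP (fun p => decide (p.1 ≤ x)) = 0 := by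
        rw [List.countP_eq_zero]
        intro p hp
        simp only [decide_eq_true_eq]
        intro hpx
        exact hax (le_trans (ha p hp) hpx)
      have hf : t.filter (fun p => decide (p.1 ≤ x)) = [] := by
        rw [List.filter_eq_nil_iff]
        intro p hp
        simp only [decide_eq_true_eq]
        intro hpx
        exact hax (le_trans (ha p hp) hpx)
      simp [pvCnt, hax, h0, hf]

theorem pv_cnt_spec (sm : List (Int × Int)) (hs : sm.Pairwise (fun a b => a.1 ≤ b.1)) (x : Int) :
    ∀ (j : Nat) (hj : j < sm.length), (j < pvCnt sm x ↔ (sm[j]'hj).1 ≤ x) := by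
  induction sm with
  | nil => intro j hj; simp at hj
  | cons a t ih =>
    rcases List.pairwise_cons.mp hs with ⟨ha, ht⟩
    intro j hj
    by_cases hax : a.1 ≤ x
    · have hc : pvCnt (a :: t) x = pvCnt t x + 1 := by simp [pvCnt, hax]
      cases j with
      | zero => simpa [hc] using hax
      | succ j =>
        simp only [hc, List.getElem_cons_succ]
        have h2 := ih ht j (by simpa using hj)
        omega
    · have hc : pvCnt (a :: t) x = 0 := by
        have h0 : t.countP (fun p => decide (p.1 ≤ x)) = 0 := by
          rw [List.countP_eq_zero]
          intro p hp
          simp only [decide_eq_true_eq]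
          intro hpx
          exact hax (le_trans (ha p hp) hpx)
        simp [pvCnt, hax, h0]
      cases j with
      | zero => simp [hc, hax]
      | succ j =>
        simp only [hc, List.getElem_cons_succ]
        constructor
        · intro h2; omega
        · intro hpx
          exact absurd (le_trans (ha _ (List.getElem_mem _)) hpx) hax

-- the inner while loop writes the pending coin sum into slot n and advances the pointer to pvCnt sm x
theorem pv_while_spec (sm : List (Int × Int)) (hs : sm.Pairwise (fun a b => a.1 ≤ b.1)) (x : Int) (n : Nat) :
    ∀ (k index : Nat), pvCnt sm x - index = k → index ≤ pvCnt sm x →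
    ∀ (result : List Int), n < result.length →
    maximumCoinsWhile sm x (n : Int) result index =
      (result.set n (result.getD n 0 + (((sm.take (pvCnt sm x)).drop index).map (fun p => p.2)).sum),
       pvCnt sm x) := by
  intro k
  induction k with
  | zero =>
    intro index hk hle result hn
    have hidx : index = pvCnt sm x := by omega
    subst hidx
    have hdrop : ((sm.take (pvCnt sm x)).drop (pvCnt sm x)) = [] := by
      apply List.drop_eq_nil_of_le
      simp
    rw [maximumCoinsWhile]
    have hres : result.set n (result.getD n 0 +
        (((sm.take (pvCnt sm x)).drop (pvCnt sm x)).map (fun p => p.2)).sum) = result := by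
      rw [hdrop]
      simp only [List.map_nil, List.sum_nil, add_zero, List.getD_eq_getElem result 0 hn]
      exact List.set_getElem_self _
    rw [hres]
    split
    · rename_i hlen
      rw [if_neg (fun hcontra => absurd ((pv_cnt_spec sm hs x _ hlen).mpr hcontra) (lt_irrefl _))]
    · rfl
  | succ k ih =>
    intro index hk hle result hn
    have hlt : index < pvCnt sm x := by omega
    have hlen : index < sm.length := lt_of_lt_of_le hlt (pv_cnt_le_length sm x)
    have hsat : (sm[index]'hlen).1 ≤ x := (pv_cnt_spec sm hs x index hlen).mp hlt
    rw [maximumCoinsWhile, dif_pos hlen, if_pos hsat]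
    have hrw : PySem.List.pySetD result (n : Int)
        (PySem.List.pyGetD result (n : Int) 0 + (sm[index]'hlen).2) =
        result.set n (result.getD n 0 + (sm[index]'hlen).2) := by
      simp [PySem.List.pySetD_natCast, PySem.List.pyGetD_natCast]
    rw [hrw]
    rw [ih (index + 1) (by omega) (by omega) _ (by simpa using hn)]
    have hget : (result.set n (result.getD n 0 + (sm[index]'hlen).2)).getD n 0 =
        result.getD n 0 + (sm[index]'hlen).2 := by
      rw [List.getD_eq_getElem _ 0 (by simpa using hn)]
      exact List.getElem_set_self _
    rw [hget, List.set_set]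
    have hcons : (sm.take (pvCnt sm x)).drop index =
        (sm[index]'hlen) :: (sm.take (pvCnt sm x)).drop (index + 1) := by
      have hlt' : index < (sm.take (pvCnt sm x)).length := by
        simp only [List.length_take]
        omega
      rw [List.drop_eq_getElem_cons hlt', List.getElem_take]
    rw [hcons]
    simp only [List.map_cons, List.sum_cons]
    ring_nf

-- the outer fold over the sorted heroes: each slot k ends up holding the prefix sum for hero k
theorem pv_outer (sm : List (Int × Int)) (hs : sm.Pairwise (fun a b => a.1 ≤ b.1))
    (heroes : List Int) :
    ∀ (sh : List (Int × Int)),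
    sh.Pairwise (fun a b => a.1 ≤ b.1) →
    (∀ q ∈ sh, ∃ (kk : Nat) (hkk : kk < heroes.length), q = (heroes[kk], (kk : Int))) →
    ∀ (result : List Int) (index : Nat) (prev : Int),
    result.length = heroes.length →
    prev = ((sm.take index).map (fun p => p.2)).sum →
    (∀ q ∈ sh, index ≤ pvCnt sm q.1) →
    (sh.foldl
      (fun (st : List Int × Nat × Int) q =>
        let result1 := PySem.List.pySetD st.1 q.2 st.2.2
        let w := maximumCoinsWhile sm q.1 q.2 result1 st.2.1
        (w.1, w.2, PySem.List.pyGetD w.1 q.2 0))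
      (result, index, prev)).1.length = heroes.length ∧
    ∀ (k : Nat) (hk : k < heroes.length),
      (sh.foldl
        (fun (st : List Int × Nat × Int) q =>
          let result1 := PySem.List.pySetD st.1 q.2 st.2.2
          let w := maximumCoinsWhile sm q.1 q.2 result1 st.2.1
          (w.1, w.2, PySem.List.pyGetD w.1 q.2 0))
        (result, index, prev)).1.getD k 0 =
        if (heroes[k], (k : Int)) ∈ sh then
          ((sm.take (pvCnt sm (heroes[k]))).map (fun p => p.2)).sum
        else result.getD k 0 := by
  intro sh
  induction sh with
  | nil =>
    intro _ _ result index prev hlen _ _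
    simp [hlen]
  | cons q sh ihs =>
    intro hsh hsub result index prev hlen hprev hidx
    rcases List.pairwise_cons.mp hsh with ⟨hq, hsh'⟩
    rcases hsub q (List.mem_cons_self) with ⟨kk, hkk, rfl⟩
    have hle : index ≤ pvCnt sm (heroes[kk]'hkk) := hidx _ List.mem_cons_self
    simp only [List.foldl_cons]
    -- evaluate one step of the fold
    have hn1 : kk < (PySem.List.pySetD result (kk : Int) prev).length := by
      simp [PySem.List.pySetD_natCast, hlen, hkk]
    have hset1 : PySem.List.pySetD result (kk : Int) prev = result.set kk prev := by
      simp [PySem.List.pySetD_natCast]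
    have hwhile := pv_while_spec sm hs (heroes[kk]'hkk) kk
      (pvCnt sm (heroes[kk]'hkk) - index) index rfl hle
      (PySem.List.pySetD result (kk : Int) prev) hn1
    have hval : (PySem.List.pySetD result (kk : Int) prev).getD kk 0 = prev := by
      rw [hset1, List.getD_eq_getElem _ 0 (by simp; omega), List.getElem_set_self _]
    set V : Int := ((sm.take (pvCnt sm (heroes[kk]'hkk))).map (fun p => p.2)).sum with hV
    have hsum : prev + (((sm.take (pvCnt sm (heroes[kk]'hkk))).drop index).map (fun p => p.2)).sum = V := by
      rw [hprev, hV]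
      have htk : sm.take index = (sm.take (pvCnt sm (heroes[kk]'hkk))).take index := by
        rw [List.take_take, Nat.min_eq_left hle]
      rw [htk]
      rw [← List.sum_append, ← List.map_append, List.take_append_drop]
    have hres2 : (maximumCoinsWhile sm (heroes[kk]'hkk) (kk : Int)
        (PySem.List.pySetD result (kk : Int) prev) index).1 = result.set kk V := by
      rw [hwhile, hset1, List.set_set]
      rw [List.getD_eq_getElem _ 0 (by simp; omega), List.getElem_set_self _, hsum]
    have hidx2 : (maximumCoinsWhile sm (heroes[kk]'hkk) (kk : Int)
        (PySem.List.pySetD result (kk : Int) prev) index).2 = pvCnt sm (heroes[kk]'hkk) := by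
      rw [hwhile]
    have hprev2 : PySem.List.pyGetD (result.set kk V) (kk : Int) 0 = V := by
      rw [PySem.List.pyGetD_natCast, List.getD_eq_getElem _ 0 (by simp; omega),
        List.getElem_set_self _]
    have hIH := ihs hsh'
      (fun q' hq' => hsub q' (List.mem_cons_of_mem _ hq'))
      (result.set kk V) (pvCnt sm (heroes[kk]'hkk)) V
      (by simp [hlen])
      hV
      (fun q' hq' => pv_cnt_mono sm (hq q' hq'))
    rcases hIH with ⟨hIHlen, hIHget⟩
    constructor
    · simpa only [hres2, hidx2, hprev2] using hIHlen
    · intro k hk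
      have hIHk := hIHget k hk
      simp only [hres2, hidx2, hprev2]
      rw [hIHk]
      by_cases hmem : (heroes[k]'hk, (k : Int)) ∈ sh
      · rw [if_pos hmem, if_pos (List.mem_cons_of_mem _ hmem)]
      · rw [if_neg hmem]
        by_cases hkkk : k = kk
        · subst hkkk
          rw [if_pos (by exact List.mem_cons_self)]
          rw [List.getD_eq_getElem _ 0 (by simp; omega), List.getElem_set_self _]
        · rw [if_neg]
          · rw [List.getD_eq_getElem _ 0 (by simp; omega),
              List.getElem_set_ne (by omega) , List.getD_eq_getElem _ 0 (by omega)]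
          · intro hmem'
            rcases List.mem_cons.mp hmem' with heq | hmem''
            · have : (k : Int) = (kk : Int) := congrArg Prod.snd heq
              exact hkkk (by exact_mod_cast this)
            · exact hmem hmem''

-- ===== VERDICT (by name: the statement is the Claim_ definition above) =====
theorem maximumCoins_spec : Claim_equal_maximumCoins := by
  intro heroes monsters coins _
  unfold Spec_maximumCoins maximumCoins maximumCoins_alt
  simp only []
  set zs := monsters.zip coins with hzs
  set sm := PySem.List.sorted2 zs (fun p => p.1) (fun p => p.2) with hsm
  set sh := PySem.List.sorted2 ((PySem.List.enumerate heroes).map (fun p => (p.2, p.1)))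
      (fun p => p.1) (fun p => p.2) with hsh
  have hs : sm.Pairwise (fun a b => a.1 ≤ b.1) := pv_sorted2_pairwise_fst _ _ _
  have hshp : sh.Pairwise (fun a b => a.1 ≤ b.1) := pv_sorted2_pairwise_fst _ _ _
  have hperm : sh.Perm ((PySem.List.enumerate heroes).map (fun p => (p.2, p.1))) :=
    PySem.List.sorted2_perm _ _ _ _
  have hmem : ∀ q, q ∈ sh ↔ ∃ (kk : Nat) (hkk : kk < heroes.length), q = (heroes[kk], (kk : Int)) := by
    intro q
    rw [hperm.mem_iff, List.mem_map]
    constructor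
    · rintro ⟨p, hp, rfl⟩
      rcases (PySem.List.mem_enumerate_iff _ _ _).mp hp with ⟨kk, hkk, rfl⟩
      exact ⟨kk, hkk, by simp⟩
    · rintro ⟨kk, hkk, rfl⟩
      refine ⟨((kk : Int), heroes[kk]'hkk), ?_, rfl⟩
      exact (PySem.List.mem_enumerate_iff _ _ _).mpr ⟨kk, hkk, by simp⟩
  have houter := pv_outer sm hs heroes sh hshp
    (fun q hq => (hmem q).mp hq)
    (List.replicate heroes.length 0) 0 0
    (by simp) (by simp) (fun _ _ => Nat.zero_le _)
  rcases houter with ⟨hflen, hfget⟩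
  apply List.ext_getElem
  · simp [hflen]
  · intro k hk1 hk2
    have hk : k < heroes.length := by simpa using hk2
    have hget := hfget k hk
    rw [if_pos ((hmem _).mpr ⟨k, hk, rfl⟩)] at hget
    rw [List.getD_eq_getElem _ 0 (by rw [hflen]; exact hk)] at hget
    rw [hget]
    rw [List.getElem_map]
    rw [pv_take_cnt sm hs]
    have hpf : sm.Perm zs := PySem.List.sorted2_perm _ _ _ _
    exact (((hpf.filter _).map (fun p => p.2)).sum_eq)
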